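-- pv_equiv track=rewrite | github.com/mikofb/pyaero | FileModule.py | get_dirname
-- ===== SOURCE A (Python) =====
-- def get_dirname(path, disk_name):
--     """
--         Returns the name of the current directory from the address bar or the name of the monted device @disk_name
--     """
--     temp = []
--     res = ''
--     if path[1] == ':' and len(path) == 3:
--         return disk_name
--     else:
--         for l in range(len(path)-1,1,-1):
--             if path[l] !='\\' and path[l] !='/':
--                 temp.append(path[l])
--             else:
--                 break
--     temp.reverse()
--     for k in range(len(temp)):
--         res += temp[k]
--     return res
-- ===== SOURCE B (Python) =====
-- def get_dirname(path, disk_name):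
--     """
--         Returns the name of the current directory from the address bar or the name of the monted device @disk_name
--     """
--     if path[1] == ':' and len(path) == 3:
--         return disk_name
--     s = path[2:]
--     i = max(s.rfind('\\'), s.rfind('/'))
--     return s[i + 1:]
-- ===== Notes on version B (the rewrite author's own statement) =====
-- stated objective: faster
-- what changed: Replaces the reverse per-character index loop plus list-accumulate/reverse/rebuild with slicing path[2:], locating the last separator via str.rfind, and returning the slice after it (constant-factor: C-implemented scan/slice instead of a per-character Python loop).
import Mathlib
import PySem

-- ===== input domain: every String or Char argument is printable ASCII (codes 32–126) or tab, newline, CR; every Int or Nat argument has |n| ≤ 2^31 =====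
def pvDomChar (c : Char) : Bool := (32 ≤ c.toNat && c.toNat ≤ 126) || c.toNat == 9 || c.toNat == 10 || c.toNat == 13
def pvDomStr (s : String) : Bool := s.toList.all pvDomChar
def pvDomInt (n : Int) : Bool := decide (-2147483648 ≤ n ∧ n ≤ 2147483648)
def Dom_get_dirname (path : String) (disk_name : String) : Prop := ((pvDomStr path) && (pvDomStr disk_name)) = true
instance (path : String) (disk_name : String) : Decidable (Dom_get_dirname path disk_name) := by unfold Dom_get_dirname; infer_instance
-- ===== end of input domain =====

-- B replaces A's reverse per-character index loop + list-accumulate/reverse/rebuild by rfind + slice on path[2:] (measured faster at a timing run's sizes; no argument is mutated).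

-- ===== PORT A =====
-- the reverse for-loop with break: scans indices len-1 … 2, appending until a separator
def pvLoopA (cs : List Char) : List Int → List Char → List Char
  | [], temp => temp
  | l :: rest, temp =>
    if PySem.List.pyGetD cs l ' ' ≠ '\\' ∧ PySem.List.pyGetD cs l ' ' ≠ '/' then
      pvLoopA cs rest (temp ++ [PySem.List.pyGetD cs l ' '])
    else temp

def get_dirname (path : String) (disk_name : String) : String :=
  let cs := path.toList
  if PySem.Str.pyGet? path 1 = some ':' ∧ cs.length = 3 then disk_name
  else
    let temp := (pvLoopA cs (PySem.List.pyRange ((cs.length : Int) - 1) 1 (-1)) []).reverse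
    let res := (PySem.List.pyRange 0 (temp.length : Int) 1).foldl
      (fun r k => r ++ [PySem.List.pyGetD temp k ' ']) []
    String.ofList res

-- ===== PORT B =====
def get_dirname_alt (path : String) (disk_name : String) : String :=
  if PySem.Str.pyGet? path 1 = some ':' ∧ PySem.Str.len path = 3 then disk_name
  else
    let s := PySem.List.slice path.toList (some 2) none
    let i := max (PySem.Chars.rfind s ['\\']) (PySem.Chars.rfind s ['/'])
    String.ofList (PySem.List.slice s (some (i + 1)) none)

-- ===== PRECONDITION & SPEC =====
-- Pre_ excludes exactly the strings of length < 2, on which A's path[1] raises IndexError (B raises there too).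
def Pre_get_dirname (path : String) (disk_name : String) : Prop := 2 ≤ path.toList.length
instance (path : String) (disk_name : String) : Decidable (Pre_get_dirname path disk_name) := by unfold Pre_get_dirname; infer_instance
def pvWitness_get_dirname : String × String := ("C:\\Users\\foo", "C")

def Spec_get_dirname (path : String) (disk_name : String) (out : String) : Prop := out = get_dirname_alt path disk_name
instance (path : String) (disk_name : String) (out : String) : Decidable (Spec_get_dirname path disk_name out) := by unfold Spec_get_dirname; infer_instance

-- ===== CLAIM (what is proved, stated in full; the proofs are below) =====
def Claim_equal_get_dirname : Prop := ∀ (path : String) (disk_name : String), Dom_get_dirname path disk_name → Pre_get_dirname path disk_name → Spec_get_dirname path disk_name (get_dirname path disk_name)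

-- ===== LEMMAS AND PROOFS =====

-- the separator test
def pvKeep (c : Char) : Bool := decide (c ≠ '\\') && decide (c ≠ '/')

theorem pv_isPrefixOf_singleton (a : Char) (xs : List Char) :
    ([a].isPrefixOf xs) = (xs.head? == some a) := by
  cases xs with
  | nil => simp [List.isPrefixOf]
  | cons x xs => simp [List.isPrefixOf, eq_comm]

theorem pv_go_le (s sub : List Char) : ∀ j : Nat, PySem.Chars.rfind.go s sub j ≤ (j : Int) := by
  intro j
  induction j with
  | zero => simp [PySem.Chars.rfind.go]; split <;> omega
  | succ m ih =>
    simp only [PySem.Chars.rfind.go]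
    split
    · omega
    · exact le_trans ih (by push_cast; omega)

theorem pv_neg_one_le_go (s sub : List Char) : ∀ j : Nat, -1 ≤ PySem.Chars.rfind.go s sub j := by
  intro j
  induction j with
  | zero => simp [PySem.Chars.rfind.go]; split <;> omega
  | succ m ih =>
    simp only [PySem.Chars.rfind.go]
    split
    · omega
    · exact ih

theorem pv_neg_one_le_rfind (s : List Char) (a : Char) : -1 ≤ PySem.Chars.rfind s [a] :=
  pv_neg_one_le_go s [a] s.length

theorem pv_rfind_lt_length (s : List Char) (a : Char) :
    PySem.Chars.rfind s [a] < (s.length : Int) := by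
  unfold PySem.Chars.rfind
  cases hs : s.length with
  | zero =>
    have : s = [] := List.eq_nil_of_length_eq_zero hs
    subst this
    simp [PySem.Chars.rfind.go, List.isPrefixOf]
  | succ m =>
    simp only [PySem.Chars.rfind.go]
    have hdrop : List.drop (m + 1) s = [] := by
      apply List.drop_eq_nil_of_le; omega
    rw [hdrop]
    have hpre : ([a].isPrefixOf ([] : List Char)) = false := rfl
    rw [hpre]
    simp only [Bool.false_eq_true, if_false]
    have := pv_go_le s [a] m
    push_cast; omega

theorem pv_go_append (t : List Char) (c a : Char) (hne : c ≠ a) :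
    ∀ j : Nat, j ≤ t.length →
      PySem.Chars.rfind.go (t ++ [c]) [a] j = PySem.Chars.rfind.go t [a] j := by
  intro j
  induction j with
  | zero =>
    intro _
    simp only [PySem.Chars.rfind.go, pv_isPrefixOf_singleton]
    cases t with
    | nil => simp only [List.nil_append, List.head?_cons, List.head?_nil]
             rw [if_neg (by simp [hne]), if_neg (by simp)]
    | cons x xs => simp
  | succ m ih =>
    intro hj
    simp only [PySem.Chars.rfind.go, pv_isPrefixOf_singleton]
    have hd : List.drop (m + 1) (t ++ [c]) = List.drop (m + 1) t ++ [c] := by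
      rw [List.drop_append_of_le_length hj]
    rw [hd]
    rcases lt_or_eq_of_le hj with hlt | heq
    · obtain ⟨x, xs, hx⟩ : ∃ x xs, List.drop (m + 1) t = x :: xs := by
        cases h : List.drop (m + 1) t with
        | nil => exfalso; have := List.drop_eq_nil_iff.mp h; omega
        | cons x xs => exact ⟨x, xs, rfl⟩
      rw [hx]
      simp only [List.cons_append, List.head?_cons]
      split
      · rfl
      · exact ih (by omega)
    · have hnil : List.drop (m + 1) t = [] := by
        apply List.drop_eq_nil_of_le; omega
      rw [hnil]
      simp only [List.nil_append, List.head?_cons, List.head?_nil]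
      have h1 : ((some c == some a) = true) = False := by simp [hne]
      have h2 : ((none == some a) = true) = False := by simp
      rw [if_neg (by simp [hne]), if_neg (by simp)]
      exact ih (by omega)

theorem pv_rfind_append_ne (t : List Char) (c a : Char) (hne : c ≠ a) :
    PySem.Chars.rfind (t ++ [c]) [a] = PySem.Chars.rfind t [a] := by
  unfold PySem.Chars.rfind
  have hlen : (t ++ [c]).length = t.length + 1 := by simp
  rw [hlen]
  simp only [PySem.Chars.rfind.go]
  have hdrop : List.drop (t.length + 1) (t ++ [c]) = [] := by
    apply List.drop_eq_nil_of_le; simp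
  rw [hdrop]
  have hpre : ([a].isPrefixOf ([] : List Char)) = false := rfl
  rw [hpre]
  simp only [Bool.false_eq_true, if_false]
  exact pv_go_append t c a hne t.length (le_refl _)

theorem pv_rfind_append_self (t : List Char) (c : Char) :
    PySem.Chars.rfind (t ++ [c]) [c] = (t.length : Int) := by
  unfold PySem.Chars.rfind
  have hlen : (t ++ [c]).length = t.length + 1 := by simp
  rw [hlen]
  simp only [PySem.Chars.rfind.go]
  have hdrop : List.drop (t.length + 1) (t ++ [c]) = [] := by
    apply List.drop_eq_nil_of_le; simp
  rw [hdrop]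
  have hpre : ([c].isPrefixOf ([] : List Char)) = false := rfl
  rw [hpre]
  simp only [Bool.false_eq_true, if_false]
  cases ht : t.length with
  | zero =>
    have : t = [] := List.eq_nil_of_length_eq_zero ht
    subst this
    simp [PySem.Chars.rfind.go, List.isPrefixOf]
  | succ m =>
    simp only [PySem.Chars.rfind.go]
    have hd : List.drop (m + 1) (t ++ [c]) = [c] := by
      rw [List.drop_append_of_le_length (by omega)]
      rw [List.drop_eq_nil_of_le (by omega)]
      simp
    rw [hd]
    simp [List.isPrefixOf]

-- B's core: the slice after the last separator is the reversed takeWhile of the reversed string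
theorem pv_slice_after_last_sep (s : List Char) :
    PySem.List.slice s (some (max (PySem.Chars.rfind s ['\\']) (PySem.Chars.rfind s ['/']) + 1)) none
      = (s.reverse.takeWhile pvKeep).reverse := by
  induction s using List.reverseRecOn with
  | nil => decide
  | append_singleton t c ih =>
    by_cases hb : c = '\\'
    · subst hb
      rw [pv_rfind_append_self t '\\']
      have h2 : PySem.Chars.rfind (t ++ ['\\']) ['/'] = PySem.Chars.rfind t ['/'] :=
        pv_rfind_append_ne t '\\' '/' (by decide)
      rw [h2]
      have hlt := pv_rfind_lt_length t '/'
      have hmax : max ((t.length : Int)) (PySem.Chars.rfind t ['/']) = (t.length : Int) := by omega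
      rw [hmax]
      have : ((t.length : Int) + 1) = ((t.length + 1 : Nat) : Int) := by push_cast; ring
      rw [this, PySem.List.slice_from_natCast]
      rw [List.drop_eq_nil_of_le (by simp)]
      simp [pvKeep]
    · by_cases hf : c = '/'
      · subst hf
        rw [pv_rfind_append_self t '/']
        have h2 : PySem.Chars.rfind (t ++ ['/']) ['\\'] = PySem.Chars.rfind t ['\\'] :=
          pv_rfind_append_ne t '/' '\\' (by decide)
        rw [h2]
        have hlt := pv_rfind_lt_length t '\\'
        have hmax : max (PySem.Chars.rfind t ['\\']) ((t.length : Int)) = (t.length : Int) := by omega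
        rw [hmax]
        have : ((t.length : Int) + 1) = ((t.length + 1 : Nat) : Int) := by push_cast; ring
        rw [this, PySem.List.slice_from_natCast]
        rw [List.drop_eq_nil_of_le (by simp)]
        simp [pvKeep]
      · rw [pv_rfind_append_ne t c '\\' hb, pv_rfind_append_ne t c '/' hf]
        set i := max (PySem.Chars.rfind t ['\\']) (PySem.Chars.rfind t ['/']) with hi
        have hge : -1 ≤ i := le_max_of_le_left (pv_neg_one_le_rfind t '\\')
        have hlt : i < (t.length : Int) :=
          max_lt (pv_rfind_lt_length t '\\') (pv_rfind_lt_length t '/')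
        have h0 : 0 ≤ i + 1 := by omega
        rw [PySem.List.slice_from _ h0] at ih ⊢
        have hle : (i + 1).toNat ≤ t.length := by omega
        rw [List.drop_append_of_le_length hle, ih]
        have hkeep : pvKeep c = true := by simp [pvKeep, hb, hf]
        simp [hkeep]

-- A's loop: scanning indices n-1 … 2 of cs collects the reversed takeWhile of ((cs.take n).drop 2).reverse
theorem pv_loopA_eq (cs : List Char) :
    ∀ (n : Nat) (acc : List Char), n ≤ cs.length →
      pvLoopA cs (PySem.List.pyRange ((n : Int) - 1) 1 (-1)) acc
        = acc ++ ((cs.take n).drop 2).reverse.takeWhile pvKeep := by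
  intro n
  induction n with
  | zero =>
    intro acc _
    rw [PySem.List.pyRange_neg_one_eq_nil (by omega)]
    simp [pvLoopA]
  | succ m ih =>
    intro acc hn
    by_cases hm : m ≤ 1
    · rw [PySem.List.pyRange_neg_one_eq_nil (by push_cast; omega)]
      have : (cs.take (m + 1)).drop 2 = [] := by
        apply List.drop_eq_nil_of_le
        simp [List.length_take]; omega
      simp [pvLoopA, this]
    · -- m ≥ 2, so the range is (m) :: range(m-1, 1, -1) and index m is in range
      have hcons : PySem.List.pyRange ((m + 1 : Nat) - 1) 1 (-1)
          = ((m : Int)) :: PySem.List.pyRange ((m : Int) - 1) 1 (-1) := by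
        have : ((m + 1 : Nat) : Int) - 1 = (m : Int) := by push_cast; ring
        rw [this, PySem.List.pyRange_neg_one_cons (by omega)]
      push_cast at hcons ⊢
      rw [hcons]
      have hmem : m < cs.length := by omega
      have hget : PySem.List.pyGetD cs ((m : Int)) ' ' = cs[m] := by
        rw [PySem.List.pyGetD_natCast]
        simp [List.getD, hmem]
      have htake : (cs.take (m + 1)).drop 2 = (cs.take m).drop 2 ++ [cs[m]] := by
        have h1 : List.take (m + 1) cs = List.take m cs ++ [cs[m]] := by
          rw [List.take_add_one, List.getElem?_eq_getElem hmem]; rfl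
        have h2 : 2 ≤ (List.take m cs).length := by
          simp [List.length_take]; omega
        rw [h1, List.drop_append_of_le_length h2]
      rw [htake]
      simp only [pvLoopA, hget]
      by_cases hkeep : cs[m] ≠ '\\' ∧ cs[m] ≠ '/'
      · rw [if_pos hkeep, ih (acc ++ [cs[m]]) (by omega)]
        have hk : pvKeep cs[m] = true := by simp [pvKeep, hkeep.1, hkeep.2]
        simp [hk]
      · rw [if_neg hkeep]
        have hk : pvKeep cs[m] = false := by
          simp only [pvKeep]
          rcases not_and_or.mp hkeep with h | h <;> simp [not_not.mp h]
        simp [hk]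

-- the second A-loop rebuilds temp character by character
theorem pv_rebuild (temp : List Char) :
    (PySem.List.pyRange 0 (temp.length : Int) 1).foldl
      (fun r k => r ++ [PySem.List.pyGetD temp k ' ']) [] = temp := by
  have h := PySem.List.foldl_pyRange_pyGetD temp ' '
    (fun (r : List Char) (c : Char) => r ++ [c]) [] (a := 0) (by omega)
  simp only [PySem.List.len] at h
  rw [h, Int.toNat_zero, List.drop_zero, PySem.List.foldl_append_singleton]
  simp

-- ===== VERDICT (by name: the statement is the Claim_ definition above) =====
theorem get_dirname_spec : Claim_equal_get_dirname := by
  intro path disk_name _ _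
  unfold Spec_get_dirname get_dirname get_dirname_alt
  simp only []
  have hguard : (PySem.Str.pyGet? path 1 = some ':' ∧ path.toList.length = 3)
      ↔ (PySem.Str.pyGet? path 1 = some ':' ∧ PySem.Str.len path = 3) := by
    rw [PySem.Str.len_eq]
    constructor <;> rintro ⟨h1, h2⟩ <;> exact ⟨h1, by omega⟩
  by_cases hg : PySem.Str.pyGet? path 1 = some ':' ∧ path.toList.length = 3
  · rw [if_pos hg, if_pos (hguard.mp hg)]
  · rw [if_neg hg, if_neg (fun h => hg (hguard.mpr h))]
    rw [pv_loopA_eq path.toList path.toList.length [] (le_refl _), List.take_length]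
    rw [List.nil_append, pv_rebuild]
    have hs : PySem.List.slice path.toList (some 2) none = path.toList.drop 2 := by
      have : (2 : Int) = ((2 : Nat) : Int) := by norm_num
      rw [this, PySem.List.slice_from_natCast]
    rw [hs, pv_slice_after_last_sep (path.toList.drop 2)]
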